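-- pv_equiv track=rewrite | github.com/giullianomartinez/fundamentos-algoritmos | bonificacionC3.py | calcularMayorMilla
-- ===== SOURCE A (Python) =====
-- def calcularMayorMilla(lista):
--     mayorMilla = lista[0][2]
--     menorMilla = lista[0][2]
--     socioMayorMilla = lista[0][0]
--     listaMayorMilla = []
--     listaMenorMilla = []
--     socioMenorMilla = lista[0][0]
--
--
--     for tuplas in lista:
--         if tuplas[2] > mayorMilla:
--             mayorMilla = tuplas[2]
--             socioMayorMilla = tuplas[0]
--
--         if tuplas[2] < menorMilla:
--             menorMilla = tuplas[2]
--             socioMenorMilla = tuplas[0]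
--
--     for tuplas in lista:
--         if tuplas[2] == mayorMilla:
--             listaMayorMilla.append(tuplas[0])
--
--         if tuplas[2] == menorMilla:
--             listaMenorMilla.append(tuplas[0])
--
--     return mayorMilla, listaMayorMilla, menorMilla, listaMenorMilla
-- ===== SOURCE B (Python) =====
-- def calcularMayorMilla(lista):
--     mayorMilla = lista[0][2]
--     menorMilla = lista[0][2]
--     listaMayorMilla = []
--     listaMenorMilla = []
--     for tuplas in lista:
--         if tuplas[2] > mayorMilla:
--             mayorMilla = tuplas[2]
--             listaMayorMilla = [tuplas[0]]
--         elif tuplas[2] == mayorMilla: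
--             listaMayorMilla.append(tuplas[0])
--         if tuplas[2] < menorMilla:
--             menorMilla = tuplas[2]
--             listaMenorMilla = [tuplas[0]]
--         elif tuplas[2] == menorMilla:
--             listaMenorMilla.append(tuplas[0])
--     return mayorMilla, listaMayorMilla, menorMilla, listaMenorMilla
-- ===== Notes on version B (the rewrite author's own statement) =====
-- stated objective: alternative
-- what changed: B makes a single pass that maintains the current extremes together with the member lists (resetting a list whenever its extreme improves), instead of A's two separate passes (find extremes, then collect matching members).
import Mathlib
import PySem

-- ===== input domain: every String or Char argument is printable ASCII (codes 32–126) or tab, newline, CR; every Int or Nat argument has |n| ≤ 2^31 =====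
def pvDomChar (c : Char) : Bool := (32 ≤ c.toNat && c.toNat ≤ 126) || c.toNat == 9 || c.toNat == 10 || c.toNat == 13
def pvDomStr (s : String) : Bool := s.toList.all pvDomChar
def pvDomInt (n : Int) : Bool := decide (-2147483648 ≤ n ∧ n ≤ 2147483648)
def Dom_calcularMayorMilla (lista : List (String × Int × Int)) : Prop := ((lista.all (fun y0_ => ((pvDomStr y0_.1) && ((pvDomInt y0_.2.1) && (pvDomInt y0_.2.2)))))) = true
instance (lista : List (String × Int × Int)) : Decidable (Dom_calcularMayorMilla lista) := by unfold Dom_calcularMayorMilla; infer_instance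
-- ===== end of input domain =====

-- B replaces A's two passes (find extremes, then collect members) by a single pass that
-- maintains the extremes together with their member lists; return value only, same O(n) cost.

-- ===== PORT A =====
-- two passes: first finds mayorMilla/menorMilla (and the unused socio variables),
-- second collects the names matching each extreme.
def calcularMayorMilla (lista : List (String × Int × Int)) : Int × List String × Int × List String :=
  match lista with
  | [] => (0, [], 0, [])  -- unreachable under Pre_ (Python raises IndexError on [])
  | h :: _ =>
    let s1 := lista.foldl (fun (st : Int × String × Int × String) t =>
      let st := if t.2.2 > st.1 then (t.2.2, t.1, st.2.2.1, st.2.2.2) else st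
      if t.2.2 < st.2.2.1 then (st.1, st.2.1, t.2.2, t.1) else st)
      (h.2.2, h.1, h.2.2, h.1)
    let lists := lista.foldl (fun (p : List String × List String) t =>
      let p := if t.2.2 = s1.1 then (p.1 ++ [t.1], p.2) else p
      if t.2.2 = s1.2.2.1 then (p.1, p.2 ++ [t.1]) else p) ([], [])
    (s1.1, lists.1, s1.2.2.1, lists.2)

-- ===== PORT B =====
-- one pass: state (mayor, listaMayor, menor, listaMenor), resetting a list when its extreme improves.
def calcularMayorMilla_alt (lista : List (String × Int × Int)) : Int × List String × Int × List String :=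
  match lista with
  | [] => (0, [], 0, [])  -- unreachable under Pre_ (Python raises IndexError on [])
  | h :: _ =>
    lista.foldl (fun (st : Int × List String × Int × List String) t =>
      let st := if t.2.2 > st.1 then (t.2.2, [t.1], st.2.2)
                else if t.2.2 = st.1 then (st.1, st.2.1 ++ [t.1], st.2.2) else st
      if t.2.2 < st.2.2.1 then (st.1, st.2.1, t.2.2, [t.1])
      else if t.2.2 = st.2.2.1 then (st.1, st.2.1, st.2.2.1, st.2.2.2 ++ [t.1]) else st)
      (h.2.2, [], h.2.2, [])

-- ===== PRECONDITION & SPEC =====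
-- Pre_ excludes only the empty list, on which Python A raises IndexError (lista[0]).
def Pre_calcularMayorMilla (lista : List (String × Int × Int)) : Prop := lista ≠ []
instance (lista : List (String × Int × Int)) : Decidable (Pre_calcularMayorMilla lista) := by unfold Pre_calcularMayorMilla; infer_instance
def pvWitness_calcularMayorMilla : (List (String × Int × Int)) := [("ana", 1, 5), ("bob", 2, 3)]

def Spec_calcularMayorMilla (lista : List (String × Int × Int)) (out : Int × List String × Int × List String) : Prop := out = calcularMayorMilla_alt lista
instance (lista : List (String × Int × Int)) (out : Int × List String × Int × List String) : Decidable (Spec_calcularMayorMilla lista out) := by unfold Spec_calcularMayorMilla; infer_instance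

-- ===== CLAIM (what is proved, stated in full; the proofs are below) =====
def Claim_equal_calcularMayorMilla : Prop := ∀ (lista : List (String × Int × Int)), Dom_calcularMayorMilla lista → Pre_calcularMayorMilla lista → Spec_calcularMayorMilla lista (calcularMayorMilla lista)

-- ===== LEMMAS AND PROOFS =====

-- running maximum / minimum of the third components, as A's first loop computes them
def maxFold (m : Int) (l : List (String × Int × Int)) : Int :=
  l.foldl (fun m t => if t.2.2 > m then t.2.2 else m) m
def minFold (m : Int) (l : List (String × Int × Int)) : Int :=
  l.foldl (fun m t => if t.2.2 < m then t.2.2 else m) m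

lemma le_maxFold (m : Int) (l : List (String × Int × Int)) : m ≤ maxFold m l := by
  induction l generalizing m with
  | nil => simp [maxFold]
  | cons t l ih =>
    simp only [maxFold, List.foldl_cons] at *
    split_ifs with h
    · exact le_trans (le_of_lt h) (ih _)
    · exact ih _

lemma minFold_le (m : Int) (l : List (String × Int × Int)) : minFold m l ≤ m := by
  induction l generalizing m with
  | nil => simp [minFold]
  | cons t l ih =>
    simp only [minFold, List.foldl_cons] at *
    split_ifs with h
    · exact le_trans (ih _) (le_of_lt h)
    · exact ih _

-- A's first loop: projections are the running max / min
lemma A_pass1 (l : List (String × Int × Int)) (st : Int × String × Int × String) :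
    (l.foldl (fun (st : Int × String × Int × String) t =>
      let st := if t.2.2 > st.1 then (t.2.2, t.1, st.2.2.1, st.2.2.2) else st
      if t.2.2 < st.2.2.1 then (st.1, st.2.1, t.2.2, t.1) else st) st).1 = maxFold st.1 l ∧
    (l.foldl (fun (st : Int × String × Int × String) t =>
      let st := if t.2.2 > st.1 then (t.2.2, t.1, st.2.2.1, st.2.2.2) else st
      if t.2.2 < st.2.2.1 then (st.1, st.2.1, t.2.2, t.1) else st) st).2.2.1 = minFold st.2.2.1 l := by
  induction l generalizing st with
  | nil => simp [maxFold, minFold]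
  | cons t l ih =>
    simp only [List.foldl_cons, maxFold, minFold] at *
    obtain ⟨st1, st2, st3, st4⟩ := st
    split_ifs with h1 h2 h2 <;> simpa using ih _

-- A's second loop with generalized accumulators: collects the matching names
lemma A_pass2 (M N : Int) (l : List (String × Int × Int)) (a b : List String) :
    l.foldl (fun (p : List String × List String) t =>
      let p := if t.2.2 = M then (p.1 ++ [t.1], p.2) else p
      if t.2.2 = N then (p.1, p.2 ++ [t.1]) else p) (a, b)
    = (a ++ (l.filter (fun t => t.2.2 = M)).map (·.1),
       b ++ (l.filter (fun t => t.2.2 = N)).map (·.1)) := by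
  induction l generalizing a b with
  | nil => simp
  | cons t l ih =>
    simp only [List.foldl_cons, List.filter_cons]
    split_ifs with h1 h2 h2 <;> simp_all

-- B's loop decomposes into two independent passes over (extreme, list) pairs
def stepMax (p : Int × List String) (t : String × Int × Int) : Int × List String :=
  if t.2.2 > p.1 then (t.2.2, [t.1]) else if t.2.2 = p.1 then (p.1, p.2 ++ [t.1]) else p

def stepMin (p : Int × List String) (t : String × Int × Int) : Int × List String :=
  if t.2.2 < p.1 then (t.2.2, [t.1]) else if t.2.2 = p.1 then (p.1, p.2 ++ [t.1]) else p

lemma B_split (l : List (String × Int × Int)) (m : Int) (a : List String)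
    (n : Int) (b : List String) :
    l.foldl (fun (st : Int × List String × Int × List String) t =>
      let st := if t.2.2 > st.1 then (t.2.2, [t.1], st.2.2)
                else if t.2.2 = st.1 then (st.1, st.2.1 ++ [t.1], st.2.2) else st
      if t.2.2 < st.2.2.1 then (st.1, st.2.1, t.2.2, [t.1])
      else if t.2.2 = st.2.2.1 then (st.1, st.2.1, st.2.2.1, st.2.2.2 ++ [t.1]) else st)
      (m, a, n, b)
    = ((l.foldl stepMax (m, a)).1, (l.foldl stepMax (m, a)).2,
       (l.foldl stepMin (n, b)).1, (l.foldl stepMin (n, b)).2) := by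
  induction l generalizing m a n b with
  | nil => simp
  | cons t l ih =>
    simp only [List.foldl_cons, stepMax, stepMin]
    split_ifs <;> exact ih ..

lemma maxPass (l : List (String × Int × Int)) (m : Int) (a : List String) :
    l.foldl stepMax (m, a)
    = (maxFold m l,
       (if maxFold m l = m then a else []) ++ (l.filter (fun t => t.2.2 = maxFold m l)).map (·.1)) := by
  induction l generalizing m a with
  | nil => simp [maxFold]
  | cons t l ih =>
    simp only [List.foldl_cons, stepMax, List.filter_cons]
    by_cases h1 : t.2.2 > m
    · have hMm : maxFold m (t :: l) = maxFold t.2.2 l := by simp [maxFold, h1]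
      have hne : maxFold t.2.2 l ≠ m := fun h => absurd (le_maxFold t.2.2 l) (by omega)
      rw [if_pos h1, ih, hMm, if_neg hne]
      by_cases hq : t.2.2 = maxFold t.2.2 l
      · simp [← hq]
      · simp [hq, Ne.symm hq]
    · by_cases h2 : t.2.2 = m
      · have hMm : maxFold m (t :: l) = maxFold m l := by simp [maxFold, h1]
        rw [if_neg h1, if_pos h2, ih, hMm]
        by_cases hq : maxFold m l = m
        · have ht : t.2.2 = maxFold m l := by omega
          simp [hq, ht]
        · have ht : ¬ t.2.2 = maxFold m l := by omega
          simp [hq, ht]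
      · have hMm : maxFold m (t :: l) = maxFold m l := by simp [maxFold, h1]
        have hne : ¬ t.2.2 = maxFold m l := fun h => absurd (le_maxFold m l) (by omega)
        rw [if_neg h1, if_neg h2, ih, hMm]; simp [hne]

lemma minPass (l : List (String × Int × Int)) (n : Int) (b : List String) :
    l.foldl stepMin (n, b)
    = (minFold n l,
       (if minFold n l = n then b else []) ++ (l.filter (fun t => t.2.2 = minFold n l)).map (·.1)) := by
  induction l generalizing n b with
  | nil => simp [minFold]
  | cons t l ih =>
    simp only [List.foldl_cons, stepMin, List.filter_cons]
    by_cases h1 : t.2.2 < n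
    · have hMm : minFold n (t :: l) = minFold t.2.2 l := by simp [minFold, h1]
      have hne : minFold t.2.2 l ≠ n := fun h => absurd (minFold_le t.2.2 l) (by omega)
      rw [if_pos h1, ih, hMm, if_neg hne]
      by_cases hq : t.2.2 = minFold t.2.2 l
      · simp [← hq]
      · simp [hq, Ne.symm hq]
    · by_cases h2 : t.2.2 = n
      · have hMm : minFold n (t :: l) = minFold n l := by simp [minFold, h1]
        rw [if_neg h1, if_pos h2, ih, hMm]
        by_cases hq : minFold n l = n
        · have ht : t.2.2 = minFold n l := by omega
          simp [hq, ht]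
        · have ht : ¬ t.2.2 = minFold n l := by omega
          simp [hq, ht]
      · have hMm : minFold n (t :: l) = minFold n l := by simp [minFold, h1]
        have hne : ¬ t.2.2 = minFold n l := fun h => absurd (minFold_le n l) (by omega)
        rw [if_neg h1, if_neg h2, ih, hMm]; simp [hne]

-- ===== VERDICT (by name: the statement is the Claim_ definition above) =====
theorem calcularMayorMilla_spec : Claim_equal_calcularMayorMilla := by
  intro lista _ hpre
  unfold Spec_calcularMayorMilla
  match lista with
  | [] => exact absurd rfl hpre
  | h :: tl =>
    show calcularMayorMilla (h :: tl) = calcularMayorMilla_alt (h :: tl)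
    unfold calcularMayorMilla calcularMayorMilla_alt
    simp only
    rw [B_split, maxPass, minPass, A_pass2, (A_pass1 (h :: tl) (h.2.2, h.1, h.2.2, h.1)).1,
        (A_pass1 (h :: tl) (h.2.2, h.1, h.2.2, h.1)).2]
    simp
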